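-- pv_equiv track=rewrite | github.com/btittelbach/pyhledger | start_graphvis.py | itail
-- ===== SOURCE A (Python) =====
-- def itail(gen, n):
--     """returns n last elements of generator gen"""
--     rlist = []
--     for e in gen:
--         if n == 0 and len(rlist)>0:
--             rlist.pop(0)
--             n+=1
--         rlist.append(e)
--         n-=1
--     return rlist
-- ===== SOURCE B (Python) =====
-- def itail(gen, n):
--     """returns n last elements of generator gen"""
--     lst = list(gen)
--     return lst[-n:] if n > 0 else lst
-- ===== Notes on version B (the rewrite author's own statement) =====
-- stated objective: simpler
-- what changed: B materializes the generator once and returns the tail by a single negative-index slice (with all elements when n <= 0), replacing A's per-element counter/pop sliding-window bookkeeping.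
import Mathlib
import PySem

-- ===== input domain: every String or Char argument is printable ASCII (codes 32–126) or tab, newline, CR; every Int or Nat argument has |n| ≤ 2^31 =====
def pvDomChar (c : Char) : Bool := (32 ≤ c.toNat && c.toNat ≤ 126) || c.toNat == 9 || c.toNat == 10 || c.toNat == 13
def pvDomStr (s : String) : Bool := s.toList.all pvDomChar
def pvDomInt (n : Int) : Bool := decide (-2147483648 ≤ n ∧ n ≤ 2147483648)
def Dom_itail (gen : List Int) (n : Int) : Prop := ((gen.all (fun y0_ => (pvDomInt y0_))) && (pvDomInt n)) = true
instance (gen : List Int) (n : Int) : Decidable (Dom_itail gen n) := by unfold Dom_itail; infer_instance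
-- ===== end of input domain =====

-- B materializes the list once and returns the tail by one negative-index slice (all elements when n ≤ 0), replacing A's per-element counter/pop sliding window; equivalence proved on all inputs.


-- ===== PORT A =====
-- loop body of A: maybe pop the front (when the counter hit 0), append e, decrement the counter
def itailStep (st : List Int × Int) (e : Int) : List Int × Int :=
  let st' := if st.2 == 0 && decide (st.1.length > 0) then (st.1.tail, st.2 + 1) else st
  (st'.1 ++ [e], st'.2 - 1)

def itail (gen : List Int) (n : Int) : List Int :=
  (gen.foldl itailStep ([], n)).1

-- ===== PORT B =====
def itail_alt (gen : List Int) (n : Int) : List Int :=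
  if 0 < n then PySem.List.slice gen (some (-n)) none else gen

-- ===== PRECONDITION & SPEC =====
def Spec_itail (gen : List Int) (n : Int) (out : List Int) : Prop := out = itail_alt gen n
instance (gen : List Int) (n : Int) (out : List Int) : Decidable (Spec_itail gen n out) := by unfold Spec_itail; infer_instance

-- ===== CLAIM (what is proved, stated in full; the proofs are below) =====
def Claim_equal_itail : Prop := ∀ (gen : List Int) (n : Int), Dom_itail gen n → Spec_itail gen n (itail gen n)

-- ===== LEMMAS AND PROOFS =====
-- once the counter is negative it never changes the popping behaviour: everything is appended
theorem itail_loop_neg (xs : List Int) : ∀ (r : List Int) (m : Int), m < 0 →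
    (xs.foldl itailStep (r, m)).1 = r ++ xs := by
  induction xs with
  | nil => intro r m _; simp
  | cons x xs ih =>
    intro r m hm
    have h0 : (m == 0) = false := by simp; omega
    have : itailStep (r, m) x = (r ++ [x], m - 1) := by
      simp [itailStep, h0]
    rw [List.foldl_cons, this, ih (r ++ [x]) (m - 1) (by omega)]
    simp

-- counter 0 with a nonempty buffer: sliding window, the buffer length stays fixed
theorem itail_loop_window (xs : List Int) : ∀ (r : List Int), r ≠ [] →
    (xs.foldl itailStep (r, 0)).1 = (r ++ xs).drop xs.length := by
  induction xs with
  | nil => intro r _; simp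
  | cons x xs ih =>
    intro r hr
    obtain ⟨a, r', rfl⟩ := List.exists_cons_of_ne_nil hr
    have : itailStep (a :: r', 0) x = (r' ++ [x], 0) := by
      simp [itailStep]
    rw [List.foldl_cons, this, ih (r' ++ [x]) (by simp)]
    simp

-- positive counter m: the result is the last (r.length + m) elements, i.e. drop (xs.length - m)
theorem itail_loop_pos (xs : List Int) : ∀ (r : List Int) (m : Int), 0 < m →
    (xs.foldl itailStep (r, m)).1 = (r ++ xs).drop (xs.length - m.toNat) := by
  induction xs with
  | nil => intro r m _; simp
  | cons x xs ih =>
    intro r m hm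
    have h0 : (m == 0) = false := by simp; omega
    have hstep : itailStep (r, m) x = (r ++ [x], m - 1) := by
      simp [itailStep, h0]
    rw [List.foldl_cons, hstep]
    by_cases h1 : m = 1
    · subst h1
      norm_num
      rw [itail_loop_window xs (r ++ [x]) (by simp)]
      simp
    · rw [ih (r ++ [x]) (m - 1) (by omega)]
      have hc : xs.length - (m - 1).toNat = (x :: xs).length - m.toNat := by
        simp
        omega
      simp only [List.append_assoc, List.singleton_append, hc]

theorem itail_eq_alt (gen : List Int) (n : Int) : itail gen n = itail_alt gen n := by
  unfold itail itail_alt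
  rcases lt_trichotomy n 0 with hn | hn | hn
  · rw [if_neg (by omega), itail_loop_neg gen [] n hn]
    simp
  · subst hn
    rw [if_neg (by omega)]
    cases gen with
    | nil => simp
    | cons x xs =>
      have : itailStep ([], 0) x = ([x], -1) := by simp [itailStep]
      rw [List.foldl_cons, this, itail_loop_neg xs [x] (-1) (by omega)]
      simp
  · rw [if_pos hn, itail_loop_pos gen [] n hn]
    have hk : 0 < n.toNat := by omega
    have hn' : -n = -((n.toNat : Nat) : Int) := by omega
    rw [hn', PySem.List.slice_from_neg_natCast gen n.toNat hk]
    simp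

-- ===== VERDICT (by name: the statement is the Claim_ definition above) =====
theorem itail_spec : Claim_equal_itail := by
  intro gen n _
  exact itail_eq_alt gen n
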